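-- pv_equiv track=rewrite | github.com/sehyeogg365/Algorithm-Python-SQL | Python3/프로그래머스/0/120834. 외계행성의 나이/외계행성의 나이.py | solution
-- ===== SOURCE A (Python) =====
-- def solution(age):
--     answer = ''
--
--     strAge = str(age)
--
--     for i in strAge:
--         if i == '0':
--             answer += 'a'
--
--         if i == '1':
--             answer += 'b'
--
--         if i == '2':
--             answer += 'c'
--
--         if i == '3':
--             answer += 'd'
--
--         if i == '4':
--             answer += 'e'
--
--         if i == '5':
--             answer += 'f'
--
--         if i == '6':
--             answer += 'g'
--
--         if i == '7':
--             answer += 'h'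
--
--         if i == '8':
--             answer += 'i'
--
--         if i == '9':
--             answer += 'j'
--
--     return answer
-- ===== SOURCE B (Python) =====
-- def solution(age):
--     def go(n):
--         if n < 10:
--             return chr(97 + n)
--         return go(n // 10) + chr(97 + n % 10)
--     return go(abs(age))
-- ===== Notes on version B (the rewrite author's own statement) =====
-- stated objective: alternative
-- what changed: Replaces the string conversion plus per-character ten-way branch table with pure numeric recursion: divmod the absolute value by 10 and build the letter string most-significant-digit first, never converting the number to a string.
import Mathlib
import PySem

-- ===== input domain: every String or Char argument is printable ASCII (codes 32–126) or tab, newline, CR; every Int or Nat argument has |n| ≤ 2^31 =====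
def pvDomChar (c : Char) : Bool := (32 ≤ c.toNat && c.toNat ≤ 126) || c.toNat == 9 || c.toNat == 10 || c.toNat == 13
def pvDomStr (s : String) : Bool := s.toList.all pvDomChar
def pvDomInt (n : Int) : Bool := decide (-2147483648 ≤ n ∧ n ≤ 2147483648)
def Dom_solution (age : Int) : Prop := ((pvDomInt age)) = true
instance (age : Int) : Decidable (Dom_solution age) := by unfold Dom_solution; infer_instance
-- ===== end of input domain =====

-- B: numeric divmod recursion on |age| (no string conversion) instead of A's per-character ten-way branch table; alternative, same cost.

-- ===== PORT A =====
-- one loop iteration of A: ten independent `if` branches, each appending one letter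
def solStepA (acc : List Char) (i : Char) : List Char :=
  let acc := if i = '0' then acc ++ ['a'] else acc
  let acc := if i = '1' then acc ++ ['b'] else acc
  let acc := if i = '2' then acc ++ ['c'] else acc
  let acc := if i = '3' then acc ++ ['d'] else acc
  let acc := if i = '4' then acc ++ ['e'] else acc
  let acc := if i = '5' then acc ++ ['f'] else acc
  let acc := if i = '6' then acc ++ ['g'] else acc
  let acc := if i = '7' then acc ++ ['h'] else acc
  let acc := if i = '8' then acc ++ ['i'] else acc
  let acc := if i = '9' then acc ++ ['j'] else acc
  acc

def solution (age : Int) : String :=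
  String.mk ((PySem.Int.toChars age).foldl solStepA [])

-- ===== PORT B =====
-- go(n): recurse on n // 10, emitting chr(97 + n % 10) on the way back
def solGo (n : Nat) : List Char :=
  if n < 10 then [Char.ofNat (97 + n)]
  else solGo (n / 10) ++ [Char.ofNat (97 + n % 10)]
decreasing_by exact Nat.div_lt_self (by omega) (by omega)

def solution_alt (age : Int) : String :=
  String.mk (solGo age.natAbs)

-- ===== PRECONDITION & SPEC =====
def Spec_solution (age : Int) (out : String) : Prop := out = solution_alt age
instance (age : Int) (out : String) : Decidable (Spec_solution age out) := by unfold Spec_solution; infer_instance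

-- ===== CLAIM (what is proved, stated in full; the proofs are below) =====
def Claim_equal_solution : Prop := ∀ (age : Int), Dom_solution age → Spec_solution age (solution age)

-- ===== LEMMAS AND PROOFS =====

-- A's step on a digit character appends exactly the arithmetic letter
lemma solStepA_digit (acc : List Char) (d : Nat) (hd : d < 10) :
    solStepA acc (Nat.digitChar d) = acc ++ [Char.ofNat (97 + d)] := by
  interval_cases d <;> simp [solStepA, Nat.digitChar]

-- A's step on '-' appends nothing
lemma solStepA_minus (acc : List Char) : solStepA acc '-' = acc := by
  simp [solStepA]

-- A's fold over the decimal digit characters of m produces B's recursion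
lemma foldl_toDigits (m : Nat) : ∀ acc : List Char,
    (Nat.toDigits 10 m).foldl solStepA acc = acc ++ solGo m := by
  induction m using Nat.strong_induction_on with
  | _ m ih =>
    intro acc
    rw [Nat.toDigits_eq_if (by omega)]
    by_cases h : m < 10
    · rw [if_pos h, solGo, if_pos h]
      simp [solStepA_digit acc m h]
    · rw [if_neg h, solGo, if_neg h, List.foldl_append,
        ih (m / 10) (Nat.div_lt_self (by omega) (by omega)) acc]
      simp [solStepA_digit _ (m % 10) (Nat.mod_lt _ (by omega))]

-- ===== VERDICT (by name: the statement is the Claim_ definition above) =====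
theorem solution_spec : Claim_equal_solution := by
  intro age _
  unfold Spec_solution solution solution_alt PySem.Int.toChars
  by_cases h : age < 0
  · rw [if_pos h]
    simp [List.foldl, solStepA_minus, foldl_toDigits]
  · rw [if_neg h]
    have : age.toNat = age.natAbs := by omega
    rw [this, foldl_toDigits]
    simp
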